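-- pv_equiv track=rewrite | github.com/pradheap/coding-problems | matrix_flip_an_image/source.py | flip_image
-- ===== SOURCE A (Python) =====
-- def flip_image(matrix):
--     for row in matrix:
--         first = 0
--         last = len(row) - 1
--         while first < last:
--             row[first], row[last] = row[last], row[first]
--             first += 1
--             last -= 1
--         for i in range(len(row)):
--             row[i] ^= 1
--
--     return matrix
-- ===== SOURCE B (Python) =====
-- def flip_image(matrix):
--     # One forward pass per row: prepend each flipped bit, so the output
--     # row comes out reversed automatically (fold with a prepend accumulator).
--     # Builds fresh row lists; A's in-place mutation is not performed.
--     out = []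
--     for row in matrix:
--         acc = []
--         for bit in row:
--             acc = [bit ^ 1] + acc
--         out.append(acc)
--     return out
-- ===== Notes on version B (the rewrite author's own statement) =====
-- stated objective: alternative
-- what changed: Instead of A's two in-place passes per row (a two-pointer swap loop to reverse, then an index loop XORing each cell), B makes a single forward pass per row folding each flipped bit onto the FRONT of a fresh accumulator list, so the row comes out reversed as a by-product; B builds new rows rather than mutating the caller's (return value is identical).
import Mathlib
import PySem

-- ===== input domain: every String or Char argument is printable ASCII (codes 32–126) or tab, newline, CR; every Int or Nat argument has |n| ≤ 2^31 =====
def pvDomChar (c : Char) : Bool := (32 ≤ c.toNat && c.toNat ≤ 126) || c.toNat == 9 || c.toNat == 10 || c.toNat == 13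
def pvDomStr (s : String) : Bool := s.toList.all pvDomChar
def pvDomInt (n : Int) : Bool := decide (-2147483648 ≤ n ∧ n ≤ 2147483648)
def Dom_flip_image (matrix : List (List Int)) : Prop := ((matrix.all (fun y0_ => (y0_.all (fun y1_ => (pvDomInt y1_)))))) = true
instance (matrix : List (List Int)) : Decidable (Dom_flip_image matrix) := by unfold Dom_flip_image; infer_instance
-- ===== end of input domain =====

-- B replaces A's two in-place per-row passes (two-pointer swap, then XOR loop) by one forward
-- fold that prepends each flipped bit to a fresh accumulator (objective: alternative).
-- A mutates the caller's rows in place, B builds new lists; the theorems are about the return value.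

-- ===== PORT A =====
-- while first < last: swap row[first], row[last]; first += 1; last -= 1
def pvRevLoopA (row : List Int) (first last : Int) : List Int :=
  if first < last then
    -- row[first], row[last] = row[last], row[first]  (RHS read from the original row)
    pvRevLoopA
      (PySem.List.pySetD (PySem.List.pySetD row first (PySem.List.pyGetD row last 0)) last
        (PySem.List.pyGetD row first 0))
      (first + 1) (last - 1)
  else row
termination_by (last - first).toNat
decreasing_by omega

def flip_image (matrix : List (List Int)) : List (List Int) :=
  matrix.map (fun row =>
    let r := pvRevLoopA row 0 ((row.length : Int) - 1)
    -- for i in range(len(row)): row[i] ^= 1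
    (PySem.List.pyRange 0 (r.length : Int) 1).foldl
      (fun acc i => PySem.List.pySetD acc i (PySem.Int.bxor (PySem.List.pyGetD acc i 0) 1)) r)

-- ===== PORT B =====
-- out = []; for row in matrix: acc = []; for bit in row: acc = [bit ^ 1] + acc; out.append(acc)
def flip_image_alt (matrix : List (List Int)) : List (List Int) :=
  matrix.foldl
    (fun out row => out ++ [row.foldl (fun acc bit => PySem.Int.bxor bit 1 :: acc) []]) []

-- ===== PRECONDITION & SPEC =====
def Spec_flip_image (matrix : List (List Int)) (out : List (List Int)) : Prop := out = flip_image_alt matrix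
instance (matrix : List (List Int)) (out : List (List Int)) : Decidable (Spec_flip_image matrix out) := by unfold Spec_flip_image; infer_instance

-- ===== CLAIM (what is proved, stated in full; the proofs are below) =====
def Claim_equal_flip_image : Prop := ∀ (matrix : List (List Int)), Dom_flip_image matrix → Spec_flip_image matrix (flip_image matrix)

-- ===== LEMMAS AND PROOFS =====

lemma pvGetDLen {u v : List Int} {a : Int} : (u ++ a :: v).getD u.length 0 = a := by
  induction u with
  | nil => rfl
  | cons h t ih => simp only [List.cons_append, List.length_cons, List.getD_cons_succ]; exact ih

lemma pvSetLen {u v : List Int} {a w : Int} : (u ++ a :: v).set u.length w = u ++ w :: v := by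
  induction u with
  | nil => rfl
  | cons h t ih => simp only [List.cons_append, List.length_cons, List.set_cons_succ]; rw [ih]

-- the two-pointer swap loop reverses the middle segment
lemma revLoopA_spec : ∀ (n : Nat) (m p s : List Int), m.length = n →
    pvRevLoopA (p ++ m ++ s) (p.length : Int) ((p.length : Int) + m.length - 1)
      = p ++ m.reverse ++ s := by
  intro n
  induction n using Nat.strong_induction_on with
  | _ n ih =>
    intro m p s hm
    match m, hm with
    | [], _ =>
      rw [pvRevLoopA]
      simp
    | [x], _ =>
      rw [pvRevLoopA]
      simp
    | x :: t, hm =>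
      rcases t.eq_nil_or_concat with rfl | ⟨m'', y, rfl⟩
      · rw [pvRevLoopA]; simp
      · simp only [List.concat_eq_append] at hm ⊢
        rw [pvRevLoopA]
        have hlen : ((x :: (m'' ++ [y])).length : Int) = (m''.length : Int) + 2 := by
          simp; ring
        have hcond : (p.length : Int) < (p.length : Int) + (x :: (m'' ++ [y])).length - 1 := by
          rw [hlen]; omega
        rw [if_pos hcond]
        have e1 : p ++ (x :: (m'' ++ [y])) ++ s = p ++ x :: (m'' ++ ([y] ++ s)) := by simp
        have e2 : p ++ (x :: (m'' ++ [y])) ++ s = (p ++ x :: m'') ++ y :: s := by simp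
        have hidx : (p.length : Int) + (x :: (m'' ++ [y])).length - 1
            = (((p ++ x :: m'').length : Nat) : Int) := by simp; ring
        have hfirst : PySem.List.pyGetD (p ++ (x :: (m'' ++ [y])) ++ s) (p.length : Int) 0 = x := by
          rw [PySem.List.pyGetD_natCast, e1, pvGetDLen]
        have hlast : PySem.List.pyGetD (p ++ (x :: (m'' ++ [y])) ++ s)
            ((p.length : Int) + (x :: (m'' ++ [y])).length - 1) 0 = y := by
          rw [hidx, PySem.List.pyGetD_natCast, e2, pvGetDLen]
        have hset : PySem.List.pySetD
            (PySem.List.pySetD (p ++ (x :: (m'' ++ [y])) ++ s) (p.length : Int) y)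
            ((p.length : Int) + (x :: (m'' ++ [y])).length - 1) x
            = (p ++ [y]) ++ m'' ++ (x :: s) := by
          rw [PySem.List.pySetD_natCast, e1, pvSetLen, hidx, PySem.List.pySetD_natCast]
          have e3 : p ++ y :: (m'' ++ ([y] ++ s)) = (p ++ y :: m'') ++ y :: s := by simp
          have e4 : (p ++ x :: m'').length = (p ++ y :: m'').length := by simp
          rw [e3, e4, pvSetLen]
          simp
        rw [hfirst, hlast, hset]
        have harg1 : (p.length : Int) + 1 = (((p ++ [y]).length : Nat) : Int) := by simp
        have harg2 : (p.length : Int) + (x :: (m'' ++ [y])).length - 1 - 1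
            = (((p ++ [y]).length : Nat) : Int) + (m''.length : Int) - 1 := by
          rw [hlen]; simp; ring
        rw [harg1, harg2]
        rw [ih m''.length (by subst hm; simp) m'' (p ++ [y]) (x :: s) rfl]
        simp

-- the XOR loop maps bxor · 1 over the list
lemma xorLoopA_spec : ∀ (s p : List Int),
    (PySem.List.pyRange (p.length : Int) ((p.length : Int) + (s.length : Int)) 1).foldl
      (fun acc i => PySem.List.pySetD acc i (PySem.Int.bxor (PySem.List.pyGetD acc i 0) 1)) (p ++ s)
    = p ++ s.map (fun b => PySem.Int.bxor b 1) := by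
  intro s
  induction s with
  | nil => intro p; simp [PySem.List.pyRange]
  | cons x t ih =>
    intro p
    have hcons : PySem.List.pyRange (p.length : Int) ((p.length : Int) + ((x :: t).length : Int)) 1
        = (p.length : Int) :: PySem.List.pyRange ((p.length : Int) + 1) ((p.length : Int) + ((x :: t).length : Int)) 1 := by
      rw [PySem.List.pyRange_one_cons]; simp
    rw [hcons, List.foldl_cons]
    have hget : PySem.List.pyGetD (p ++ x :: t) (p.length : Int) 0 = x := by
      rw [PySem.List.pyGetD_natCast, pvGetDLen]
    have hset : PySem.List.pySetD (p ++ x :: t) (p.length : Int)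
        (PySem.Int.bxor (PySem.List.pyGetD (p ++ x :: t) (p.length : Int) 0) 1)
        = (p ++ [PySem.Int.bxor x 1]) ++ t := by
      rw [hget, PySem.List.pySetD_natCast, pvSetLen]
      simp
    rw [hset]
    have hb1 : (p.length : Int) + 1 = (((p ++ [PySem.Int.bxor x 1]).length : Nat) : Int) := by simp
    have hb2 : (p.length : Int) + ((x :: t).length : Int)
        = (((p ++ [PySem.Int.bxor x 1]).length : Nat) : Int) + (t.length : Int) := by
      simp; ring
    rw [hb1, hb2, ih (p ++ [PySem.Int.bxor x 1])]
    simp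

-- B's inner fold: prepending flipped bits yields the reversed mapped row
lemma prependFold_spec : ∀ (row acc : List Int),
    row.foldl (fun acc bit => PySem.Int.bxor bit 1 :: acc) acc
      = (row.map (fun b => PySem.Int.bxor b 1)).reverse ++ acc := by
  intro row
  induction row with
  | nil => intro acc; simp
  | cons x t ih => intro acc; simp [ih]

-- B's outer fold: appending singletons is a map
lemma appendFold_spec (g : List Int → List Int) : ∀ (m : List (List Int)) (acc : List (List Int)),
    m.foldl (fun out row => out ++ [g row]) acc = acc ++ m.map g := by
  intro m
  induction m with
  | nil => intro acc; simp
  | cons x t ih => intro acc; simp [ih]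

-- ===== VERDICT (by name: the statement is the Claim_ definition above) =====
theorem flip_image_spec : Claim_equal_flip_image := by
  intro matrix _
  unfold Spec_flip_image flip_image flip_image_alt
  rw [appendFold_spec]
  simp only [List.nil_append]
  apply List.map_congr_left
  intro row _
  have hrev : pvRevLoopA row 0 ((row.length : Int) - 1) = row.reverse := by
    have := revLoopA_spec row.length row [] [] rfl
    simpa using this
  simp only [hrev]
  have hx := xorLoopA_spec row.reverse []
  have hp := prependFold_spec row []
  simp only [List.nil_append, List.append_nil] at hx hp
  rw [hp]
  simpa [List.map_reverse] using hx
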